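-- pv_equiv track=rewrite | github.com/SnowScriptWinterOfCode/LeetCode_Q | Day-6/q1-Convert array into 2D array/namita0210-python.py | create_minimal_2d_array
-- ===== SOURCE A (Python) =====
-- from collections import defaultdict
--
-- def create_minimal_2d_array(nums):
--     num_count = defaultdict(int)
--     for num in nums:
--         num_count[num] += 1
--
--     max_freq = max(num_count.values())
--     result = [[] for _ in range(max_freq)]
--
--     for num, freq in num_count.items():
--         for i in range(freq):
--             result[i].append(num)
--
--     return result
-- ===== SOURCE B (Python) =====
-- from collections import Counter
--
-- def create_minimal_2d_array(nums):
--     counts = Counter(nums)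
--     max_freq = max(counts.values())
--     return [[num for num, c in counts.items() if c > i] for i in range(max_freq)]
-- ===== Notes on version B (the rewrite author's own statement) =====
-- stated objective: simpler
-- what changed: Instead of pre-allocating rows and distributing each distinct number across its first freq rows with nested append loops, B transposes the iteration: one comprehension per row index i keeps the distinct numbers (in first-occurrence order) whose count exceeds i.
import Mathlib
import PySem

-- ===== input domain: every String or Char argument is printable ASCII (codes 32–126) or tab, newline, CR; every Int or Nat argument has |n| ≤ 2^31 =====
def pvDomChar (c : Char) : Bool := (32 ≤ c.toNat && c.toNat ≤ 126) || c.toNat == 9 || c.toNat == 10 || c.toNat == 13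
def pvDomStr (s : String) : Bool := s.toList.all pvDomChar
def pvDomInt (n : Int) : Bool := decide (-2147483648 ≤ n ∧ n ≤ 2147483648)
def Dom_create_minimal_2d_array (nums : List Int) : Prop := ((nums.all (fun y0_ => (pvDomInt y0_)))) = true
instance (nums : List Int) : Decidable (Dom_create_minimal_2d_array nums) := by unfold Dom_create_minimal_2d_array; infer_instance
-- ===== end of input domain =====

-- B replaces A's pre-allocated rows + per-number distribution loops by one row-comprehension:
-- row i lists the distinct numbers (first-occurrence order) whose count exceeds i (objective: simpler).

-- ===== PORT A =====
-- Literal port of A. The defaultdict counting loop is the foldl of Dict.modify;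
-- `result[i].append(num)` is List.modify at index i (i comes from range(freq), so 0 ≤ i and
-- i < max_freq = result's length: `.toNat` is exact here, no negative index can occur).
def create_minimal_2d_array (nums : List Int) : List (List Int) :=
  let num_count : PySem.Dict Int Int :=
    nums.foldl (fun d num => d.modify num 0 (· + 1)) PySem.Dict.empty
  match PySem.List.max? (PySem.Dict.values num_count) (fun v => v) with
  | none => []  -- Python: max() of empty sequence raises ValueError; excluded by Pre_
  | some max_freq =>
    let result : List (List Int) := (PySem.List.pyRange 0 max_freq 1).map (fun _ => [])
    (PySem.Dict.items num_count).foldl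
      (fun res p =>
        (PySem.List.pyRange 0 p.2 1).foldl
          (fun r i => r.modify i.toNat (· ++ [p.1])) res)
      result

-- ===== PORT B =====
-- Literal port of Source B: counts = Counter(nums); one comprehension over range(max_freq).
def create_minimal_2d_array_alt (nums : List Int) : List (List Int) :=
  let counts : PySem.Dict Int Int := PySem.Dict.counter nums
  match PySem.List.max? (PySem.Dict.values counts) (fun v => v) with
  | none => []  -- Python: max() of empty sequence raises ValueError; excluded by Pre_
  | some max_freq =>
    (PySem.List.pyRange 0 max_freq 1).map
      (fun i => ((PySem.Dict.items counts).filter (fun p => i < p.2)).map Prod.fst)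

-- ===== PRECONDITION & SPEC =====
-- Pre_ excludes only the empty list, on which Python's max() (in both A and B) raises ValueError.
def Pre_create_minimal_2d_array (nums : List Int) : Prop := nums ≠ []
instance (nums : List Int) : Decidable (Pre_create_minimal_2d_array nums) := by
  unfold Pre_create_minimal_2d_array; infer_instance

def pvWitness_create_minimal_2d_array : List Int := [1, 2, 2, 3]

def Spec_create_minimal_2d_array (nums : List Int) (out : List (List Int)) : Prop :=
  out = create_minimal_2d_array_alt nums
instance (nums : List Int) (out : List (List Int)) : Decidable (Spec_create_minimal_2d_array nums out) := by
  unfold Spec_create_minimal_2d_array; infer_instance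

-- ===== CLAIM (what is proved, stated in full; the proofs are below) =====
def Claim_equal_create_minimal_2d_array : Prop :=
  ∀ (nums : List Int), Dom_create_minimal_2d_array nums →
    Pre_create_minimal_2d_array nums →
    Spec_create_minimal_2d_array nums (create_minimal_2d_array nums)

-- ===== LEMMAS AND PROOFS =====

-- A's inner loop `for i in range(freq): result[i].append(num)` appends num to every row
-- whose index is below freq (List.modify past the end is a no-op, and such an index never
-- occurs in A since freq ≤ max_freq = number of rows).
theorem inner_loop_eq_mapIdx (f : Nat) (num : Int) (rows : List (List Int)) :
    (PySem.List.pyRange 0 (f : Int) 1).foldl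
        (fun r i => r.modify i.toNat (· ++ [num])) rows
      = rows.mapIdx (fun j r => if j < f then r ++ [num] else r) := by
  induction f generalizing rows with
  | zero =>
    have h0 : PySem.List.pyRange 0 ((0:Nat) : Int) 1 = [] := by
      rw [PySem.List.pyRange_one] ; simp
    rw [h0, List.foldl_nil]
    apply List.ext_getElem <;> simp
  | succ f ih =>
    have hrng : PySem.List.pyRange 0 ((f : Int) + 1) 1
        = PySem.List.pyRange 0 (f : Int) 1 ++ [(f : Int)] := by
      rw [PySem.List.pyRange_one_succ_right] ; omega
    push_cast
    rw [hrng, List.foldl_append, ih]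
    apply List.ext_getElem
    · simp
    · intro j h1 h2
      simp only [List.foldl_cons, List.foldl_nil, Int.toNat_natCast,
        List.getElem_modify, List.getElem_mapIdx]
      split_ifs <;> first | rfl | omega

-- Same statement for an arbitrary Int bound c (range(c) is empty for c ≤ 0).
theorem inner_loop_eq_mapIdx_int (c : Int) (num : Int) (rows : List (List Int)) :
    (PySem.List.pyRange 0 c 1).foldl
        (fun r i => r.modify i.toNat (· ++ [num])) rows
      = rows.mapIdx (fun j r => if (j : Int) < c then r ++ [num] else r) := by
  have h1 : PySem.List.pyRange 0 c 1 = PySem.List.pyRange 0 (c.toNat : Int) 1 := by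
    have h2 : (c - 0).toNat = ((c.toNat : Int) - 0).toNat := by omega
    rw [PySem.List.pyRange_one, PySem.List.pyRange_one, h2]
  rw [h1, inner_loop_eq_mapIdx]
  apply List.ext_getElem
  · simp
  · intro j h2 h3
    simp only [List.getElem_mapIdx]
    by_cases h : (j : Int) < c
    · rw [if_pos h, if_pos (by omega)]
    · rw [if_neg h, if_neg (by omega)]

-- A's outer loop over the (num, freq) items transposed: row j collects, in item order,
-- the nums of the items whose freq exceeds j.
theorem outer_loop_eq_mapIdx (items : List (Int × Int)) (rows : List (List Int)) :
    items.foldl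
        (fun res p =>
          (PySem.List.pyRange 0 p.2 1).foldl
            (fun r i => r.modify i.toNat (· ++ [p.1])) res)
        rows
      = rows.mapIdx
          (fun j r => r ++ (items.filter (fun p => (j : Int) < p.2)).map Prod.fst) := by
  induction items generalizing rows with
  | nil =>
    apply List.ext_getElem <;> simp
  | cons p rest ih =>
    rw [List.foldl_cons, inner_loop_eq_mapIdx_int, ih]
    rw [List.mapIdx_mapIdx]
    apply List.ext_getElem
    · simp
    · intro j h1 h2
      simp only [List.getElem_mapIdx, Function.comp, List.filter_cons]
      by_cases h : (j : Int) < p.2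
      · simp [h]
      · simp [h]

-- ===== VERDICT (by name: the statement is the Claim_ definition above) =====
theorem create_minimal_2d_array_spec : Claim_equal_create_minimal_2d_array := by
  intro nums _ _
  unfold Spec_create_minimal_2d_array create_minimal_2d_array create_minimal_2d_array_alt
  rw [← PySem.Dict.counter_eq_foldl]
  cases hmax : PySem.List.max? (PySem.Dict.values (PySem.Dict.counter nums)) (fun v => v) with
  | none => simp only [hmax]
  | some max_freq =>
    simp only [hmax, outer_loop_eq_mapIdx]
    apply List.ext_getElem
    · simp [PySem.List.length_pyRange_one]
    · intro j h1 h2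
      simp [List.getElem_mapIdx, PySem.List.getElem_pyRange_one]
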